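-- pv_equiv track=rewrite | github.com/lepijohnny/aoc24 | days/day12/part2.py | walk_the_edge
-- ===== SOURCE A (Python) =====
-- def walk_the_edge(edges: set[tuple[int, int, int]]) -> int:
--
--     # for up, down walk left or right, for left, right walk up or down
--     move = [[(0, 1), (0, -1)], [(0, -1), (0, 1)], [(1, 0), (-1, 0)], [(1, 0), (-1, 0)]]
--
--     count = 0
--     used = set()
--     while len(edges) > 0:
--         edge = edges.pop()
--
--         if edge in used:
--             continue
--
--         side = [edge]
--
--         while len(side) > 0:
--             x, y, dir = side.pop()
--             for dx, dy in move[dir]: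
--                 xx, yy = x + dx, y + dy
--                 if (xx, yy, dir) in edges and (xx, yy, dir) not in used:
--                     side.append((xx, yy, dir))
--                     used.add((xx, yy, dir))
--
--         count += 1
--     return count
-- ===== SOURCE B (Python) =====
-- def walk_the_edge(edges: set[tuple[int, int, int]]) -> int:
--     # Each fence side is a maximal run of consecutive edge segments with the same
--     # direction; count one per run by counting the segments whose predecessor
--     # (one step back along the run's axis) is not in the set.
--     # Like A, this consumes the argument: edges is left empty.
--     PRED = [(0, -1), (0, -1), (-1, 0), (-1, 0)]
--     count = 0
--     for x, y, d in edges: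
--         dx, dy = PRED[d]
--         if (x + dx, y + dy, d) not in edges:
--             count += 1
--     edges.clear()
--     return count
-- ===== Notes on version B (the rewrite author's own statement) =====
-- stated objective: simpler
-- what changed: A floods each fence side with a BFS worklist over a popped-edge set and a used set; B replaces all of that by a single pass that counts the segments whose predecessor along the side's axis is absent from the set (one per maximal run), reproducing A's side effect of emptying the argument.
import Mathlib
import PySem

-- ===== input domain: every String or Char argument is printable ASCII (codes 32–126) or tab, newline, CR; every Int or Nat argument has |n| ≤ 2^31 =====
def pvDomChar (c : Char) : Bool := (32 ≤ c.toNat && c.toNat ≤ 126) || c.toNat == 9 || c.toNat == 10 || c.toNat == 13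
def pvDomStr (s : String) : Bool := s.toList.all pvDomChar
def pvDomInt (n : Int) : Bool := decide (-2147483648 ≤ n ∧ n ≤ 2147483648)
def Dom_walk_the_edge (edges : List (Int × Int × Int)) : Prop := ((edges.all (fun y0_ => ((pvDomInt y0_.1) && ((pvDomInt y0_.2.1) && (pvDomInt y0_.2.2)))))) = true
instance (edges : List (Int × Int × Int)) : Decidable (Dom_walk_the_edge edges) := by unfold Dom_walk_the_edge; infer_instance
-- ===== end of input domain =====

-- ===== PORT A =====
-- Literal port of A (count fence sides by popping edges and flooding each side).
-- Python's set.pop() returns an arbitrary element; the edge set is carried as the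
-- list of its distinct elements and pop takes the head (the returned count is
-- independent of that choice).  A empties its argument as a side effect; only the
-- return value is modelled (and B's Python reproduces the clearing).
def pvMove : List (List (Int × Int)) :=
  [[(0,1),(0,-1)], [(0,-1),(0,1)], [(1,0),(-1,0)], [(1,0),(-1,0)]]

-- one `if (xx, yy, dir) in edges and (xx, yy, dir) not in used:` step of the inner for-loop
def pvPush (R : List (Int × Int × Int)) (x y d : Int)
    (su : List (Int × Int × Int) × List (Int × Int × Int)) (m : Int × Int) :
    List (Int × Int × Int) × List (Int × Int × Int) :=
  let nb := (x + m.1, y + m.2, d)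
  if nb ∈ R ∧ nb ∉ su.2 then (su.1 ++ [nb], nb :: su.2) else su

-- termination helpers for the inner while-loop (cited in decreasing_by)
lemma pvFilterMono (R used : List (Int × Int × Int)) (nb : Int × Int × Int) :
    (R.filter (fun a => a ∉ nb :: used)).length ≤ (R.filter (fun a => a ∉ used)).length := by
  apply List.Sublist.length_le
  apply List.monotone_filter_right
  intro a ha
  simp at ha ⊢
  exact fun h => (ha.2 h).elim

lemma pvFilterLt (R used : List (Int × Int × Int)) (nb : Int × Int × Int)
    (h1 : nb ∈ R) (h2 : nb ∉ used) :
    (R.filter (fun a => a ∉ nb :: used)).length < (R.filter (fun a => a ∉ used)).length := by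
  obtain ⟨l1, l2, rfl⟩ := List.append_of_mem h1
  have m1 := pvFilterMono l1 used nb
  have m2 := pvFilterMono l2 used nb
  simp only [List.filter_append, List.length_append, List.filter_cons,
    show (decide (nb ∉ nb :: used)) = false by simp,
    show (decide (nb ∉ used)) = true by simp [h2],
    Bool.false_eq_true, if_false, if_true, List.length_cons]
  omega

lemma pvPushMeasure (R : List (Int × Int × Int)) (x y d : Int)
    (su : List (Int × Int × Int) × List (Int × Int × Int)) (m : Int × Int) :
    2 * ((R.filter (fun a => a ∉ (pvPush R x y d su m).2)).length) + (pvPush R x y d su m).1.length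
      ≤ 2 * ((R.filter (fun a => a ∉ su.2)).length) + su.1.length := by
  unfold pvPush
  by_cases h : (x + m.1, y + m.2, d) ∈ R ∧ (x + m.1, y + m.2, d) ∉ su.2
  · simp only [if_pos h]
    have := pvFilterLt R su.2 _ h.1 h.2
    simp only [List.length_append, List.length_cons, List.length_nil]
    omega
  · simp [h]

lemma pvFoldMeasure (R : List (Int × Int × Int)) (x y d : Int)
    (ms : List (Int × Int)) (su : List (Int × Int × Int) × List (Int × Int × Int)) :
    2 * ((R.filter (fun a => a ∉ (ms.foldl (pvPush R x y d) su).2)).length)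
        + (ms.foldl (pvPush R x y d) su).1.length
      ≤ 2 * ((R.filter (fun a => a ∉ su.2)).length) + su.1.length := by
  induction ms generalizing su with
  | nil => simp
  | cons m ms ih =>
    simp only [List.foldl_cons]
    exact le_trans (ih _) (pvPushMeasure R x y d su m)

-- the inner `while len(side) > 0:` loop; returns the final `used`
def pvInner (R : List (Int × Int × Int)) (side used : List (Int × Int × Int)) :
    List (Int × Int × Int) :=
  match h : PySem.List.pop? side (-1) with
  | none => used
  | some (e, rest) =>
    let su := ((PySem.List.pyGet? pvMove e.2.2).getD []).foldl (pvPush R e.1 e.2.1 e.2.2) (rest, used)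
    pvInner R su.1 su.2
termination_by 2 * ((R.filter (fun a => a ∉ used)).length) + side.length
decreasing_by
  have hlen : rest.length + 1 = side.length := PySem.List.length_of_pop?_eq_some side h
  exact Nat.lt_of_le_of_lt
    (pvFoldMeasure R e.1 e.2.1 e.2.2 ((PySem.List.pyGet? pvMove e.2.2).getD []) (rest, used))
    (Nat.add_lt_add_left (by exact (by omega : rest.length < side.length)) _)

-- the outer `while len(edges) > 0:` loop
def pvOuter : List (Int × Int × Int) → List (Int × Int × Int) → Int → Int
  | [], _, count => count
  | e :: rest, used, count =>
    if e ∈ used then pvOuter rest used count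
    else pvOuter rest (pvInner rest [e] used) (count + 1)

def walk_the_edge (edges : List (Int × Int × Int)) : Int :=
  pvOuter edges [] 0

-- ===== PORT B =====
-- B counts, in one pass, the edge segments whose predecessor along their side's
-- axis is absent: one per maximal run, i.e. one per fence side.
def pvPred : List (Int × Int) := [(0,-1), (0,-1), (-1,0), (-1,0)]

def walk_the_edge_alt (edges : List (Int × Int × Int)) : Int :=
  edges.foldl (fun c e =>
    match PySem.List.pyGet? pvPred e.2.2 with
    | some m => if (e.1 + m.1, e.2.1 + m.2, e.2.2) ∈ edges then c else c + 1
    | none => c) 0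

-- ===== PRECONDITION & SPEC =====
-- Pre_ excludes (i) inputs containing a direction outside -4..3, on which both
-- Pythons raise IndexError (move[dir] / PRED[d]), and (ii) duplicate list entries,
-- which do not represent a Python set (the argument is a set of distinct edges).
def Pre_walk_the_edge (edges : List (Int × Int × Int)) : Prop :=
  edges.Nodup ∧ ∀ e ∈ edges, -4 ≤ e.2.2 ∧ e.2.2 ≤ 3

instance (edges : List (Int × Int × Int)) : Decidable (Pre_walk_the_edge edges) := by
  unfold Pre_walk_the_edge; infer_instance

def pvWitness_walk_the_edge : (List (Int × Int × Int)) :=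
  [(0,0,0), (0,1,0), (2,2,3)]

def Spec_walk_the_edge (edges : List (Int × Int × Int)) (out : Int) : Prop := out = walk_the_edge_alt edges
instance (edges : List (Int × Int × Int)) (out : Int) : Decidable (Spec_walk_the_edge edges out) := by unfold Spec_walk_the_edge; infer_instance

-- ===== CLAIM (what is proved, stated in full; the proofs are below) =====
def Claim_equal_walk_the_edge : Prop := ∀ (edges : List (Int × Int × Int)), Dom_walk_the_edge edges → Pre_walk_the_edge edges → Spec_walk_the_edge edges (walk_the_edge edges)

-- ===== LEMMAS AND PROOFS =====

-- B's predecessor step for a direction, and the segment k steps along a run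
def pvPd (d : Int) : Int × Int := (PySem.List.pyGet? pvPred d).getD (0,0)

def pvShift (e : Int × Int × Int) (k : Int) : Int × Int × Int :=
  (e.1 + k * (pvPd e.2.2).1, e.2.1 + k * (pvPd e.2.2).2, e.2.2)

-- b lies in the same fence side (maximal run) as e within the edge set S
def pvInComp (S : List (Int × Int × Int)) (e b : Int × Int × Int) : Prop :=
  ∃ k : Int, b = pvShift e k ∧ ∀ j : Int, min 0 k ≤ j → j ≤ max 0 k → pvShift e j ∈ S

lemma pvShift_zero (e : Int × Int × Int) : pvShift e 0 = e := by
  simp [pvShift]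

lemma pvShift_shift (e : Int × Int × Int) (k j : Int) :
    pvShift (pvShift e k) j = pvShift e (k + j) := by
  simp only [pvShift, Prod.mk.injEq]
  refine ⟨?_, ?_, ?_⟩ <;> first | trivial | ring

lemma pvPd_ne (d : Int) (h1 : -4 ≤ d) (h2 : d ≤ 3) : pvPd d ≠ (0, 0) := by
  interval_cases d <;> decide

lemma pvPred_spec (d : Int) (h1 : -4 ≤ d) (h2 : d ≤ 3) :
    PySem.List.pyGet? pvPred d = some (pvPd d) := by
  interval_cases d <;> decide

lemma pvMove_spec (d : Int) (h1 : -4 ≤ d) (h2 : d ≤ 3) :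
    PySem.List.pyGet? pvMove d = some [(-(pvPd d).1, -(pvPd d).2), pvPd d] ∨
    PySem.List.pyGet? pvMove d = some [pvPd d, (-(pvPd d).1, -(pvPd d).2)] := by
  interval_cases d <;> first
    | (left; decide)
    | (right; decide)

lemma pvShift_inj (e : Int × Int × Int) (hpd : pvPd e.2.2 ≠ (0, 0)) (k1 k2 : Int)
    (h : pvShift e k1 = pvShift e k2) : k1 = k2 := by
  simp only [pvShift, Prod.mk.injEq] at h
  obtain ⟨hx, hy, -⟩ := h
  by_cases hp1 : (pvPd e.2.2).1 = 0
  · have hp2 : (pvPd e.2.2).2 ≠ 0 := by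
      intro hp2
      exact hpd (Prod.ext hp1 hp2)
    have : k1 * (pvPd e.2.2).2 = k2 * (pvPd e.2.2).2 := by omega
    exact mul_right_cancel₀ hp2 this
  · have : k1 * (pvPd e.2.2).1 = k2 * (pvPd e.2.2).1 := by omega
    exact mul_right_cancel₀ hp1 this

lemma pvComp_self (S : List (Int × Int × Int)) (e : Int × Int × Int) (heS : e ∈ S) :
    pvInComp S e e := by
  refine ⟨0, (pvShift_zero e).symm, ?_⟩
  intro j hj1 hj2
  simp only [min_self, max_self] at hj1 hj2
  have : j = 0 := le_antisymm hj2 hj1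
  rw [this, pvShift_zero]
  exact heS

lemma pvComp_mem (S : List (Int × Int × Int)) (e b : Int × Int × Int)
    (h : pvInComp S e b) : b ∈ S := by
  obtain ⟨k, hb, hint⟩ := h
  rw [hb]
  exact hint k (by omega) (by omega)

lemma pvComp_dir (S : List (Int × Int × Int)) (e a : Int × Int × Int)
    (h : pvInComp S e a) : a.2.2 = e.2.2 := by
  obtain ⟨k, ha, -⟩ := h
  rw [ha]
  rfl

lemma pvComp_adj (S : List (Int × Int × Int)) (e a b : Int × Int × Int)
    (ha : pvInComp S e a) (hbS : b ∈ S)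
    (hadj : b = pvShift a 1 ∨ b = pvShift a (-1)) : pvInComp S e b := by
  obtain ⟨k, ha, hint⟩ := ha
  rcases hadj with hb | hb
  · refine ⟨k + 1, by rw [hb, ha, pvShift_shift], ?_⟩
    intro j hj1 hj2
    by_cases hold : min 0 k ≤ j ∧ j ≤ max 0 k
    · exact hint j hold.1 hold.2
    · have : j = k + 1 := by omega
      rw [this, ← pvShift_shift, ← ha, ← hb]
      exact hbS
  · refine ⟨k + (-1), by rw [hb, ha, pvShift_shift], ?_⟩
    intro j hj1 hj2
    by_cases hold : min 0 k ≤ j ∧ j ≤ max 0 k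
    · exact hint j hold.1 hold.2
    · have : j = k + (-1) := by omega
      rw [this, ← pvShift_shift, ← ha, ← hb]
      exact hbS

lemma pvComp_symm (S : List (Int × Int × Int)) (e b : Int × Int × Int)
    (h : pvInComp S e b) : pvInComp S b e := by
  obtain ⟨k, hb, hint⟩ := h
  refine ⟨-k, by rw [hb, pvShift_shift]; simp [pvShift_zero], ?_⟩
  intro j hj1 hj2
  rw [hb, pvShift_shift]
  exact hint (k + j) (by omega) (by omega)

lemma pvComp_closed (S : List (Int × Int × Int)) (e : Int × Int × Int)
    (V : (Int × Int × Int) → Prop) (hVe : V e)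
    (hstep : ∀ a b, pvInComp S e a → V a → b ∈ S →
        (b = pvShift a 1 ∨ b = pvShift a (-1)) → V b) :
    ∀ b, pvInComp S e b → V b := by
  intro b hb
  obtain ⟨k, hb, hint⟩ := hb
  by_cases hk : 0 ≤ k
  · have main : ∀ n : ℕ, (n : Int) ≤ k → V (pvShift e (n : Int)) := by
      intro n
      induction n with
      | zero =>
        intro _
        rw [show ((0 : ℕ) : Int) = 0 from rfl, pvShift_zero]
        exact hVe
      | succ m ih =>
        intro hle
        have hc1 : ((m + 1 : ℕ) : Int) = (m : Int) + 1 := by push_cast; ring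
        have hm : (m : Int) ≤ k := by omega
        have hcm : pvInComp S e (pvShift e (m : Int)) :=
          ⟨(m : Int), rfl, fun j hj1 hj2 => hint j (by omega) (by omega)⟩
        rw [hc1]
        apply hstep (pvShift e (m : Int)) _ hcm (ih hm)
        · exact hint ((m : Int) + 1) (by omega) (by omega)
        · left
          rw [pvShift_shift]
    have := main k.toNat (by omega)
    rw [show ((k.toNat : ℕ) : Int) = k by omega, ← hb] at this
    exact this
  · have main : ∀ n : ℕ, k ≤ -(n : Int) → V (pvShift e (-(n : Int))) := by
      intro n
      induction n with
      | zero =>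
        intro _
        rw [show -((0 : ℕ) : Int) = 0 from rfl, pvShift_zero]
        exact hVe
      | succ m ih =>
        intro hle
        have hc1 : -((m + 1 : ℕ) : Int) = -(m : Int) + (-1) := by push_cast; ring
        have hm : k ≤ -(m : Int) := by omega
        have hcm : pvInComp S e (pvShift e (-(m : Int))) :=
          ⟨-(m : Int), rfl, fun j hj1 hj2 => hint j (by omega) (by omega)⟩
        rw [hc1]
        apply hstep (pvShift e (-(m : Int))) _ hcm (ih hm)
        · exact hint (-(m : Int) + (-1)) (by omega) (by omega)
        · right
          rw [pvShift_shift]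
    have := main (-k).toNat (by omega)
    rw [show -(((-k).toNat : ℕ) : Int) = k by omega, ← hb] at this
    exact this

lemma pvExists_start (S : List (Int × Int × Int)) (e : Int × Int × Int)
    (heS : e ∈ S) (hpd : pvPd e.2.2 ≠ (0, 0)) :
    ∃ s, pvInComp S e s ∧ pvShift s 1 ∉ S := by
  classical
  set P : ℕ → Prop := fun n => ∀ j : ℕ, j ≤ n → pvShift e (j : Int) ∈ S with hP
  have hP0 : P 0 := by
    intro j hj
    interval_cases j
    rw [show ((0 : ℕ) : Int) = 0 from rfl, pvShift_zero]
    exact heS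
  have hbound : ∀ n : ℕ, P n → n < S.length := by
    intro n hPn
    have hnd : ((List.range (n + 1)).map (fun j : ℕ => pvShift e (j : Int))).Nodup := by
      refine List.Nodup.map_on ?_ List.nodup_range
      intro x _ y _ hxy
      have := pvShift_inj e hpd x y hxy
      omega
    have hsub : ((List.range (n + 1)).map (fun j : ℕ => pvShift e (j : Int))).toFinset ⊆ S.toFinset := by
      intro x hx
      simp only [List.mem_toFinset, List.mem_map, List.mem_range] at hx
      obtain ⟨j, hj, rfl⟩ := hx
      simp only [List.mem_toFinset]
      exact hPn j (by omega)
    have h1 := Finset.card_le_card hsub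
    rw [List.toFinset_card_of_nodup hnd] at h1
    simp only [List.length_map, List.length_range] at h1
    have h2 := List.toFinset_card_le S
    omega
  set km := Nat.findGreatest P S.length with hkm
  have hPkm : P km := Nat.findGreatest_spec (Nat.zero_le _) hP0
  have hnot : ¬ P (km + 1) := by
    intro hPk
    have hle : km + 1 ≤ S.length := Nat.le_of_lt (hbound _ hPk)
    have := Nat.findGreatest_is_greatest (P := P) (n := S.length) (k := km + 1)
      (by omega) hle
    exact this hPk
  have hout : pvShift e ((km : Int) + 1) ∉ S := by
    intro hin
    apply hnot
    intro j hj
    rcases Nat.lt_or_ge j (km + 1) with hj' | hj'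
    · exact hPkm j (by omega)
    · have : j = km + 1 := by omega
      rw [this, show ((km + 1 : ℕ) : Int) = (km : Int) + 1 by push_cast; ring]
      exact hin
  refine ⟨pvShift e (km : Int), ⟨(km : Int), rfl, ?_⟩, ?_⟩
  · intro j hj1 hj2
    have hj0 : 0 ≤ j := by omega
    have := hPkm j.toNat (by omega)
    rw [show ((j.toNat : ℕ) : Int) = j by omega] at this
    exact this
  · rw [pvShift_shift]
    exact hout

lemma pvStart_unique (S : List (Int × Int × Int)) (e s1 s2 : Int × Int × Int)
    (h1 : pvInComp S e s1) (hs1 : pvShift s1 1 ∉ S)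
    (h2 : pvInComp S e s2) (hs2 : pvShift s2 1 ∉ S) : s1 = s2 := by
  obtain ⟨k1, hb1, hint1⟩ := h1
  obtain ⟨k2, hb2, hint2⟩ := h2
  have key : ∀ ka kb : Int,
      (∀ j : Int, min 0 ka ≤ j → j ≤ max 0 ka → pvShift e j ∈ S) →
      (∀ j : Int, min 0 kb ≤ j → j ≤ max 0 kb → pvShift e j ∈ S) →
      pvShift e (ka + 1) ∉ S → ¬ ka < kb := by
    intro ka kb hia hib hns hlt
    apply hns
    by_cases h0 : 0 ≤ ka
    · exact hib (ka + 1) (by omega) (by omega)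
    · exact hia (ka + 1) (by omega) (by omega)
  rw [hb1, pvShift_shift] at hs1
  rw [hb2, pvShift_shift] at hs2
  have n1 := key k1 k2 hint1 hint2 hs1
  have n2 := key k2 k1 hint2 hint1 hs2
  have : k1 = k2 := by omega
  rw [hb1, hb2, this]

-- counting: countP is oblivious to a pointwise-equal predicate, and drops by one
-- when exactly one list element moves from satisfying f to satisfying g
lemma pvCountP_split (l : List (Int × Int × Int)) (f g : (Int × Int × Int) → Bool)
    (hnd : l.Nodup) (a : Int × Int × Int) (ha : a ∈ l)
    (h1 : ∀ x ∈ l, g x = true → f x = true)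
    (h2 : ∀ x ∈ l, (f x = true ∧ ¬ g x = true) ↔ x = a) :
    l.countP f = l.countP g + 1 := by
  induction l with
  | nil => cases ha
  | cons y l ih =>
    obtain ⟨hyl, hndl⟩ := List.nodup_cons.1 hnd
    by_cases hy : y = a
    · subst hy
      obtain ⟨hfy, hgy⟩ := (h2 y (List.mem_cons_self)).2 rfl
      have hrest : l.countP f = l.countP g := by
        apply List.countP_congr
        intro x hx
        have hxa : x ≠ y := fun hxy => hyl (hxy ▸ hx)
        constructor
        · intro hfx
          by_contra hgx
          exact hxa ((h2 x (List.mem_cons_of_mem _ hx)).1 ⟨hfx, hgx⟩)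
        · exact h1 x (List.mem_cons_of_mem _ hx)
      rw [List.countP_cons, List.countP_cons, hrest, hfy, if_pos rfl]
      simp [Bool.not_eq_true] at hgy
      rw [hgy]
      simp
    · have hal : a ∈ l := by
        rcases List.mem_cons.1 ha with h | h
        · exact absurd h.symm hy
        · exact h
      have hfg : f y = g y := by
        have hnxa : ¬ (f y = true ∧ ¬ g y = true) := fun hc => hy ((h2 y List.mem_cons_self).1 hc)
        cases hgy : g y
        · cases hfy : f y
          · rfl
          · exact absurd ⟨hfy, by simp [hgy]⟩ hnxa
        · rw [h1 y List.mem_cons_self hgy]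
      have := ih hndl hal
        (fun x hx => h1 x (List.mem_cons_of_mem _ hx))
        (fun x hx => h2 x (List.mem_cons_of_mem _ hx))
      rw [List.countP_cons, List.countP_cons, hfg, this]
      omega

lemma pvShift_one_tuple (a : Int × Int × Int) :
    pvShift a 1 = (a.1 + (pvPd a.2.2).1, a.2.1 + (pvPd a.2.2).2, a.2.2) := by
  simp [pvShift]

lemma pvShift_negone_tuple (a : Int × Int × Int) :
    pvShift a (-1) = (a.1 + -(pvPd a.2.2).1, a.2.1 + -(pvPd a.2.2).2, a.2.2) := by
  simp only [pvShift, Prod.mk.injEq]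
  refine ⟨?_, ?_, ?_⟩ <;> first | trivial | ring

-- one conditional push preserves the flood invariant
lemma pvPush_step (S R : List (Int × Int × Int)) (e a : Int × Int × Int)
    (hRS : ∀ x ∈ R, x ∈ S) (heR : e ∉ R)
    (ha : pvInComp S e a) (m : Int × Int)
    (hm : (a.1 + m.1, a.2.1 + m.2, a.2.2) = pvShift a 1 ∨
          (a.1 + m.1, a.2.1 + m.2, a.2.2) = pvShift a (-1))
    (su : List (Int × Int × Int) × List (Int × Int × Int))
    (I1 : ∀ x ∈ su.1, pvInComp S e x ∧ (x = e ∨ x ∈ su.2))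
    (I2 : ∀ x, pvInComp S e x → (x = e ∨ x ∈ su.2) → x ∈ su.1 ∨ x = a ∨
        ∀ b, b ∈ S → (b = pvShift x 1 ∨ b = pvShift x (-1)) → (b = e ∨ b ∈ su.2)) :
    (∀ x ∈ (pvPush R a.1 a.2.1 a.2.2 su m).1,
        pvInComp S e x ∧ (x = e ∨ x ∈ (pvPush R a.1 a.2.1 a.2.2 su m).2)) ∧
    (∀ x, pvInComp S e x → (x = e ∨ x ∈ (pvPush R a.1 a.2.1 a.2.2 su m).2) →
        x ∈ (pvPush R a.1 a.2.1 a.2.2 su m).1 ∨ x = a ∨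
        ∀ b, b ∈ S → (b = pvShift x 1 ∨ b = pvShift x (-1)) →
          (b = e ∨ b ∈ (pvPush R a.1 a.2.1 a.2.2 su m).2)) ∧
    (∀ x ∈ su.2, x ∈ (pvPush R a.1 a.2.1 a.2.2 su m).2) ∧
    (∀ x ∈ (pvPush R a.1 a.2.1 a.2.2 su m).2, x ∈ su.2 ∨ (pvInComp S e x ∧ x ≠ e)) ∧
    ((a.1 + m.1, a.2.1 + m.2, a.2.2) ∈ R →
        (a.1 + m.1, a.2.1 + m.2, a.2.2) ∈ (pvPush R a.1 a.2.1 a.2.2 su m).2) := by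
  by_cases hc : (a.1 + m.1, a.2.1 + m.2, a.2.2) ∈ R ∧ (a.1 + m.1, a.2.1 + m.2, a.2.2) ∉ su.2
  · have hpush : pvPush R a.1 a.2.1 a.2.2 su m =
        (su.1 ++ [(a.1 + m.1, a.2.1 + m.2, a.2.2)], (a.1 + m.1, a.2.1 + m.2, a.2.2) :: su.2) := by
      unfold pvPush
      simp only [if_pos hc]
    rw [hpush]
    have hnbS : (a.1 + m.1, a.2.1 + m.2, a.2.2) ∈ S := hRS _ hc.1
    have hnbC : pvInComp S e (a.1 + m.1, a.2.1 + m.2, a.2.2) := pvComp_adj S e a _ ha hnbS hm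
    have hnbe : (a.1 + m.1, a.2.1 + m.2, a.2.2) ≠ e := fun hh => heR (hh ▸ hc.1)
    refine ⟨?_, ?_, ?_, ?_, ?_⟩
    · intro x hx
      rcases List.mem_append.1 hx with hx | hx
      · obtain ⟨hcx, hvx⟩ := I1 x hx
        exact ⟨hcx, hvx.imp id (List.mem_cons_of_mem _)⟩
      · rw [List.mem_singleton.1 hx]
        exact ⟨hnbC, Or.inr List.mem_cons_self⟩
    · intro x hcx hvx
      by_cases hxnb : x = (a.1 + m.1, a.2.1 + m.2, a.2.2)
      · exact Or.inl (List.mem_append.2 (Or.inr (List.mem_singleton.2 hxnb)))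
      · have hvx' : x = e ∨ x ∈ su.2 := by
          rcases hvx with hh | hh
          · exact Or.inl hh
          · rcases List.mem_cons.1 hh with hh | hh
            · exact absurd hh hxnb
            · exact Or.inr hh
        rcases I2 x hcx hvx' with hh | hh | hh
        · exact Or.inl (List.mem_append.2 (Or.inl hh))
        · exact Or.inr (Or.inl hh)
        · refine Or.inr (Or.inr fun b hbS hadj => ?_)
          rcases hh b hbS hadj with hb | hb
          · exact Or.inl hb
          · exact Or.inr (List.mem_cons_of_mem _ hb)
    · exact fun x hx => List.mem_cons_of_mem _ hx
    · intro x hx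
      rcases List.mem_cons.1 hx with hh | hh
      · exact Or.inr ⟨hh ▸ hnbC, hh ▸ hnbe⟩
      · exact Or.inl hh
    · intro _
      exact List.mem_cons_self
  · have hpush : pvPush R a.1 a.2.1 a.2.2 su m = su := by
      unfold pvPush
      simp only [if_neg hc]
    rw [hpush]
    refine ⟨I1, fun x hcx hvx => I2 x hcx hvx, fun x hx => hx, fun x hx => Or.inl hx, ?_⟩
    intro hR
    by_cases hu : (a.1 + m.1, a.2.1 + m.2, a.2.2) ∈ su.2
    · exact hu
    · exact absurd ⟨hR, hu⟩ hc

-- the inner flood, run on a side's seed e, adds exactly e's run (minus e) to used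
lemma pvInner_spec (S R : List (Int × Int × Int)) (e : Int × Int × Int)
    (hRS : ∀ x ∈ R, x ∈ S) (heR : e ∉ R)
    (hcomp : ∀ b, pvInComp S e b → b = e ∨ b ∈ R)
    (hd1 : -4 ≤ e.2.2) (hd2 : e.2.2 ≤ 3) :
    ∀ side used,
      (∀ a ∈ side, pvInComp S e a ∧ (a = e ∨ a ∈ used)) →
      (∀ a, pvInComp S e a → (a = e ∨ a ∈ used) → a ∈ side ∨
          ∀ b, b ∈ S → (b = pvShift a 1 ∨ b = pvShift a (-1)) → (b = e ∨ b ∈ used)) →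
      (∀ x ∈ used, x ∈ pvInner R side used) ∧
      (∀ x ∈ pvInner R side used, x ∈ used ∨ (pvInComp S e x ∧ x ≠ e)) ∧
      (∀ a, pvInComp S e a → (a = e ∨ a ∈ pvInner R side used) →
          ∀ b, b ∈ S → (b = pvShift a 1 ∨ b = pvShift a (-1)) →
            (b = e ∨ b ∈ pvInner R side used)) := by
  intro side used
  fun_induction pvInner R side used with
  | case1 side used h =>
    intro hI1 hI2
    have hside : side = [] := by
      cases hs : side with
      | nil => rfl
      | cons y ys =>
        rw [hs, ← List.dropLast_append_getLast (l := y :: ys) (by simp),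
          PySem.List.pop?_last] at h
        cases h
    refine ⟨fun x hx => hx, fun x hx => Or.inl hx, ?_⟩
    intro a hca hva b hbS hadj
    rcases hI2 a hca hva with hs | hcl
    · rw [hside] at hs
      cases hs
    · exact hcl b hbS hadj
  | case2 side used e' rest h su ih =>
    intro hI1 hI2
    have hlen := PySem.List.length_of_pop?_eq_some side h
    have hne : side ≠ [] := by
      intro hs
      rw [hs] at hlen
      simp at hlen
    have hdecomp : side = side.dropLast ++ [side.getLast hne] :=
      (List.dropLast_append_getLast hne).symm
    have hpop : PySem.List.pop? side = some (side.getLast hne, side.dropLast) := by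
      conv_lhs => rw [hdecomp]
      exact PySem.List.pop?_last _ _
    rw [h] at hpop
    have he'gl : e' = side.getLast hne := congrArg (fun p => (Option.getD p (e', rest)).1) hpop
    have hrestdl : rest = side.dropLast := congrArg (fun p => (Option.getD p (e', rest)).2) hpop
    have he'side : e' ∈ side := by
      rw [he'gl]
      exact List.getLast_mem hne
    obtain ⟨hce', hve'⟩ := hI1 e' he'side
    have hdire : e'.2.2 = e.2.2 := pvComp_dir S e e' hce'
    have hrest_side : ∀ x ∈ rest, x ∈ side := by
      intro x hx
      rw [hrestdl] at hx
      rw [hdecomp]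
      exact List.mem_append.2 (Or.inl hx)
    have main : ∀ (u v : Int × Int),
        (PySem.List.pyGet? pvMove e'.2.2).getD [] = [u, v] →
        (((e'.1 + u.1, e'.2.1 + u.2, e'.2.2) = pvShift e' 1 ∧
          (e'.1 + v.1, e'.2.1 + v.2, e'.2.2) = pvShift e' (-1)) ∨
         ((e'.1 + u.1, e'.2.1 + u.2, e'.2.2) = pvShift e' (-1) ∧
          (e'.1 + v.1, e'.2.1 + v.2, e'.2.2) = pvShift e' 1)) →
        (∀ x ∈ used, x ∈ pvInner R su.1 su.2) ∧
        (∀ x ∈ pvInner R su.1 su.2, x ∈ used ∨ (pvInComp S e x ∧ x ≠ e)) ∧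
        (∀ a, pvInComp S e a → (a = e ∨ a ∈ pvInner R su.1 su.2) →
            ∀ b, b ∈ S → (b = pvShift a 1 ∨ b = pvShift a (-1)) →
              (b = e ∨ b ∈ pvInner R su.1 su.2)) := by
      intro u v hlist huv
      have hfold : su =
          pvPush R e'.1 e'.2.1 e'.2.2 (pvPush R e'.1 e'.2.1 e'.2.2 (rest, used) u) v := by
        have hsu : su = List.foldl (pvPush R e'.1 e'.2.1 e'.2.2) (rest, used)
            ((PySem.List.pyGet? pvMove e'.2.2).getD []) := rfl
        rw [hsu, hlist]
        simp [List.foldl]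
      have hu : (e'.1 + u.1, e'.2.1 + u.2, e'.2.2) = pvShift e' 1 ∨
          (e'.1 + u.1, e'.2.1 + u.2, e'.2.2) = pvShift e' (-1) := huv.imp And.left And.left
      have hv : (e'.1 + v.1, e'.2.1 + v.2, e'.2.2) = pvShift e' 1 ∨
          (e'.1 + v.1, e'.2.1 + v.2, e'.2.2) = pvShift e' (-1) := by
        rcases huv with ⟨_, h2⟩ | ⟨_, h2⟩
        · exact Or.inr h2
        · exact Or.inl h2
      have hI1_0 : ∀ x ∈ (rest, used).1, pvInComp S e x ∧ (x = e ∨ x ∈ (rest, used).2) :=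
        fun x hx => hI1 x (hrest_side x hx)
      have hI2_0 : ∀ x, pvInComp S e x → (x = e ∨ x ∈ (rest, used).2) →
          x ∈ (rest, used).1 ∨ x = e' ∨
          ∀ b, b ∈ S → (b = pvShift x 1 ∨ b = pvShift x (-1)) → (b = e ∨ b ∈ (rest, used).2) := by
        intro x hcx hvx
        rcases hI2 x hcx hvx with hs | hcl
        · rw [hdecomp] at hs
          rcases List.mem_append.1 hs with h1 | h1
          · left
            rw [hrestdl]
            exact h1
          · right; left
            rw [List.mem_singleton.1 h1, ← he'gl]
        · exact Or.inr (Or.inr hcl)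
      obtain ⟨I1a, I2a, mono_a, bound_a, res_a⟩ :=
        pvPush_step S R e e' hRS heR hce' u hu (rest, used) hI1_0 hI2_0
      obtain ⟨I1b, I2b, mono_b, bound_b, res_b⟩ :=
        pvPush_step S R e e' hRS heR hce' v hv
          (pvPush R e'.1 e'.2.1 e'.2.2 (rest, used) u) I1a I2a
      rw [hfold] at ih ⊢
      have hclosE' : ∀ b, b ∈ S → (b = pvShift e' 1 ∨ b = pvShift e' (-1)) →
          (b = e ∨ b ∈ (pvPush R e'.1 e'.2.1 e'.2.2 (pvPush R e'.1 e'.2.1 e'.2.2 (rest, used) u) v).2) := by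
        intro b hbS hadj
        have hbC : pvInComp S e b := pvComp_adj S e e' b hce' hbS hadj
        rcases hcomp b hbC with hbe | hbR
        · exact Or.inl hbe
        · right
          rcases huv with ⟨hu1, hv1⟩ | ⟨hu1, hv1⟩
          · rcases hadj with hb1 | hb1
            · rw [hb1, ← hu1] at hbR ⊢
              exact mono_b _ (res_a hbR)
            · rw [hb1, ← hv1] at hbR ⊢
              exact res_b hbR
          · rcases hadj with hb1 | hb1
            · rw [hb1, ← hv1] at hbR ⊢
              exact res_b hbR
            · rw [hb1, ← hu1] at hbR ⊢
              exact mono_b _ (res_a hbR)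
      have hI2' : ∀ x, pvInComp S e x →
          (x = e ∨ x ∈ (pvPush R e'.1 e'.2.1 e'.2.2 (pvPush R e'.1 e'.2.1 e'.2.2 (rest, used) u) v).2) →
          x ∈ (pvPush R e'.1 e'.2.1 e'.2.2 (pvPush R e'.1 e'.2.1 e'.2.2 (rest, used) u) v).1 ∨
          ∀ b, b ∈ S → (b = pvShift x 1 ∨ b = pvShift x (-1)) →
            (b = e ∨ b ∈ (pvPush R e'.1 e'.2.1 e'.2.2 (pvPush R e'.1 e'.2.1 e'.2.2 (rest, used) u) v).2) := by
        intro x hcx hvx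
        rcases I2b x hcx hvx with h1 | h1 | h1
        · exact Or.inl h1
        · rw [h1]
          exact Or.inr hclosE'
        · exact Or.inr h1
      obtain ⟨c1, c2, c3⟩ := ih I1b hI2'
      refine ⟨?_, ?_, ?_⟩
      · exact fun x hx => c1 x (mono_b _ (mono_a _ hx))
      · intro x hx
        rcases c2 x hx with h1 | h1
        · rcases bound_b x h1 with h2 | h2
          · rcases bound_a x h2 with h3 | h3
            · exact Or.inl h3
            · exact Or.inr h3
          · exact Or.inr h2
        · exact Or.inr h1
      · exact c3
    rcases pvMove_spec e.2.2 hd1 hd2 with hmv | hmv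
    · refine main (-(pvPd e.2.2).1, -(pvPd e.2.2).2) (pvPd e.2.2) ?_ ?_
      · rw [hdire, hmv]
        rfl
      · right
        constructor
        · rw [pvShift_negone_tuple, hdire]
        · rw [pvShift_one_tuple, hdire]
    · refine main (pvPd e.2.2) (-(pvPd e.2.2).1, -(pvPd e.2.2).2) ?_ ?_
      · rw [hdire, hmv]
        rfl
      · left
        constructor
        · rw [pvShift_one_tuple, hdire]
        · rw [pvShift_negone_tuple, hdire]

lemma pvInner_run (S R : List (Int × Int × Int)) (e : Int × Int × Int)
    (used : List (Int × Int × Int))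
    (hRS : ∀ x ∈ R, x ∈ S) (heR : e ∉ R) (heS : e ∈ S)
    (hcomp : ∀ b, pvInComp S e b → b = e ∨ b ∈ R)
    (hd1 : -4 ≤ e.2.2) (hd2 : e.2.2 ≤ 3)
    (hdisj : ∀ x, pvInComp S e x → x ∉ used) :
    ∀ x, x ∈ pvInner R [e] used ↔ x ∈ used ∨ (pvInComp S e x ∧ x ≠ e) := by
  have hInv1 : ∀ a ∈ [e], pvInComp S e a ∧ (a = e ∨ a ∈ used) := by
    intro a ha
    rw [List.mem_singleton.1 ha]
    exact ⟨pvComp_self S e heS, Or.inl rfl⟩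
  have hInv2 : ∀ a, pvInComp S e a → (a = e ∨ a ∈ used) → a ∈ [e] ∨
      ∀ b, b ∈ S → (b = pvShift a 1 ∨ b = pvShift a (-1)) → (b = e ∨ b ∈ used) := by
    intro a hca hva
    rcases hva with hh | hh
    · exact Or.inl (by rw [hh]; exact List.mem_singleton.2 rfl)
    · exact absurd hh (hdisj a hca)
  obtain ⟨c1, c2, c3⟩ := pvInner_spec S R e hRS heR hcomp hd1 hd2 [e] used hInv1 hInv2
  intro x
  constructor
  · intro hx
    exact c2 x hx
  · intro hx
    rcases hx with hh | hh
    · exact c1 x hh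
    · obtain ⟨hxC, hxe⟩ := hh
      have hcl := pvComp_closed S e (fun y => y = e ∨ y ∈ pvInner R [e] used) (Or.inl rfl)
        (fun a b hca hva hbS hadj => c3 a hca hva b hbS hadj) x hxC
      rcases hcl with h' | h'
      · exact absurd h' hxe
      · exact h'

-- outer loop invariant: the answer is count plus the number of run-starts whose
-- run has not been processed yet
lemma pvOuter_spec (S : List (Int × Int × Int)) (hnd : S.Nodup)
    (hdirs : ∀ x ∈ S, -4 ≤ x.2.2 ∧ x.2.2 ≤ 3) :
    ∀ rest P used count, S = P ++ rest →
      (∀ x ∈ used, x ∈ S) →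
      (∀ a b, (a ∈ used ∨ a ∈ P) → b ∈ S → (b = pvShift a 1 ∨ b = pvShift a (-1)) →
          (b ∈ used ∨ b ∈ P)) →
      pvOuter rest used count =
        count + (S.countP (fun s =>
          decide (pvShift s 1 ∉ S) && !(decide (s ∈ used ∨ s ∈ P))) : Int) := by
  intro rest
  induction rest with
  | nil =>
    intro P used count hS hused hclo
    have hzero : S.countP (fun s =>
        decide (pvShift s 1 ∉ S) && !(decide (s ∈ used ∨ s ∈ P))) = 0 := by
      apply List.countP_eq_zero.2
      intro s hs
      have hsP : s ∈ P := by
        rw [hS, List.append_nil] at hs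
        exact hs
      simp [hsP]
    rw [hzero]
    simp [pvOuter]
  | cons ee rest' ih =>
    intro P used count hS hused hclo
    have hndPE : (P ++ ee :: rest').Nodup := by
      rw [← hS]
      exact hnd
    have hPdisj := (List.nodup_append.1 hndPE).2.2
    have heP : ee ∉ P := fun hh => hPdisj ee hh ee List.mem_cons_self rfl
    have heRest : ee ∉ rest' := (List.nodup_cons.1 (List.nodup_append.1 hndPE).2.1).1
    have heS : ee ∈ S := by
      rw [hS]
      exact List.mem_append.2 (Or.inr List.mem_cons_self)
    have hdir := hdirs ee heS
    have hRS' : ∀ x ∈ rest', x ∈ S := by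
      intro x hx
      rw [hS]
      exact List.mem_append.2 (Or.inr (List.mem_cons_of_mem _ hx))
    by_cases hmem : ee ∈ used
    · have hstep : pvOuter (ee :: rest') used count = pvOuter rest' used count := by
        simp [pvOuter, hmem]
      rw [hstep]
      rw [ih (P ++ [ee]) used count (by rw [hS]; simp) hused ?clo]
      case clo =>
        intro a b hva hbS hadj
        have hva' : a ∈ used ∨ a ∈ P := by
          rcases hva with hh | hh
          · exact Or.inl hh
          · rcases List.mem_append.1 hh with hh | hh
            · exact Or.inr hh
            · rw [List.mem_singleton.1 hh]
              exact Or.inl hmem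
        rcases hclo a b hva' hbS hadj with hh | hh
        · exact Or.inl hh
        · exact Or.inr (List.mem_append.2 (Or.inl hh))
      congr 2
      apply List.countP_congr
      intro s _
      constructor
      · intro hh
        simp only [Bool.and_eq_true, Bool.not_eq_true', decide_eq_false_iff_not] at hh ⊢
        refine ⟨hh.1, fun hc => hh.2 ?_⟩
        rcases hc with hc | hc
        · exact Or.inl hc
        · exact Or.inr (List.mem_append.2 (Or.inl hc))
      · intro hh
        simp only [Bool.and_eq_true, Bool.not_eq_true', decide_eq_false_iff_not] at hh ⊢
        refine ⟨hh.1, fun hc => hh.2 ?_⟩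
        rcases hc with hc | hc
        · exact Or.inl hc
        · rcases List.mem_append.1 hc with hc | hc
          · exact Or.inr hc
          · rw [List.mem_singleton.1 hc]
            exact Or.inl hmem
    · -- e is a fresh seed: its whole run gets flooded
      have hnd0 : ∀ x, pvInComp S ee x → ¬ (x ∈ used ∨ x ∈ P) := by
        intro x hx hdone
        have hsymm := pvComp_symm S ee x hx
        have hVe := pvComp_closed S x (fun y => y ∈ used ∨ y ∈ P) hdone
          (fun a b _ hva hbS hadj => hclo a b hva hbS hadj) ee hsymm
        rcases hVe with hh | hh
        · exact hmem hh
        · exact heP hh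
      have hdisj : ∀ x, pvInComp S ee x → x ∉ used :=
        fun x hx hu => hnd0 x hx (Or.inl hu)
      have hcompR : ∀ b, pvInComp S ee b → b = ee ∨ b ∈ rest' := by
        intro b hb
        have hbS := pvComp_mem S ee b hb
        rw [hS] at hbS
        rcases List.mem_append.1 hbS with hh | hh
        · exact absurd (Or.inr hh) (hnd0 b hb)
        · rcases List.mem_cons.1 hh with hh | hh
          · exact Or.inl hh
          · exact Or.inr hh
      have hrun := pvInner_run S rest' ee used hRS' heRest heS hcompR hdir.1 hdir.2 hdisj
      have hstep : pvOuter (ee :: rest') used count =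
          pvOuter rest' (pvInner rest' [ee] used) (count + 1) := by
        simp [pvOuter, hmem]
      rw [hstep]
      have hDn : ∀ x, (x ∈ pvInner rest' [ee] used ∨ x ∈ P ++ [ee]) ↔
          ((x ∈ used ∨ x ∈ P) ∨ pvInComp S ee x) := by
        intro x
        constructor
        · intro hh
          rcases hh with hh | hh
          · rcases (hrun x).1 hh with hh | hh
            · exact Or.inl (Or.inl hh)
            · exact Or.inr hh.1
          · rcases List.mem_append.1 hh with hh | hh
            · exact Or.inl (Or.inr hh)
            · rw [List.mem_singleton.1 hh]
              exact Or.inr (pvComp_self S ee heS)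
        · intro hh
          rcases hh with hh | hh
          · rcases hh with hh | hh
            · exact Or.inl ((hrun x).2 (Or.inl hh))
            · exact Or.inr (List.mem_append.2 (Or.inl hh))
          · by_cases hxe : x = ee
            · exact Or.inr (List.mem_append.2 (Or.inr (List.mem_singleton.2 hxe)))
            · exact Or.inl ((hrun x).2 (Or.inr ⟨hh, hxe⟩))
      rw [ih (P ++ [ee]) (pvInner rest' [ee] used) (count + 1) (by rw [hS]; simp) ?used' ?clo']
      case used' =>
        intro x hx
        rcases (hrun x).1 hx with hh | hh
        · exact hused x hh
        · exact pvComp_mem S ee x hh.1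
      case clo' =>
        intro a b hva hbS hadj
        rcases (hDn a).1 hva with hh | hh
        · exact (hDn b).2 (Or.inl (hclo a b hh hbS hadj))
        · exact (hDn b).2 (Or.inr (pvComp_adj S ee a b hh hbS hadj))
      -- counting: exactly one start of ee's run moves from unprocessed to processed
      obtain ⟨s0, hs0C, hs0start⟩ :=
        pvExists_start S ee heS (pvPd_ne ee.2.2 hdir.1 hdir.2)
      have hs0S : s0 ∈ S := pvComp_mem S ee s0 hs0C
      have hsplit := pvCountP_split S
        (fun s => decide (pvShift s 1 ∉ S) && !(decide (s ∈ used ∨ s ∈ P)))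
        (fun s => decide (pvShift s 1 ∉ S) &&
          !(decide (s ∈ pvInner rest' [ee] used ∨ s ∈ P ++ [ee])))
        hnd s0 hs0S ?h1 ?h2
      case h1 =>
        intro x _ hg
        simp only [Bool.and_eq_true, Bool.not_eq_true', decide_eq_false_iff_not,
          decide_eq_true_eq] at hg ⊢
        exact ⟨hg.1, fun hc => hg.2 ((hDn x).2 (Or.inl hc))⟩
      case h2 =>
        intro x _
        constructor
        · intro ⟨hf, hg⟩
          simp only [Bool.and_eq_true, Bool.not_eq_true', decide_eq_false_iff_not,
            decide_eq_true_eq] at hf hg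
          have hdone'' : x ∈ pvInner rest' [ee] used ∨ x ∈ P ++ [ee] := by
            by_contra hc
            exact hg ⟨hf.1, hc⟩
          rcases (hDn x).1 hdone'' with hh | hh
          · exact absurd hh hf.2
          · exact pvStart_unique S ee x s0 hh hf.1 hs0C hs0start
        · intro hx
          rw [hx]
          constructor
          · simp only [Bool.and_eq_true, Bool.not_eq_true', decide_eq_false_iff_not,
              decide_eq_true_eq]
            exact ⟨hs0start, hnd0 s0 hs0C⟩
          · simp only [Bool.and_eq_true, Bool.not_eq_true', decide_eq_false_iff_not,
              decide_eq_true_eq, not_and, not_not]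
            intro _
            exact (hDn s0).2 (Or.inr hs0C)
      omega

lemma pvAlt_eq (S : List (Int × Int × Int))
    (hdirs : ∀ x ∈ S, -4 ≤ x.2.2 ∧ x.2.2 ≤ 3) :
    walk_the_edge_alt S = (S.countP (fun s => decide (pvShift s 1 ∉ S)) : Int) := by
  have aux : ∀ (f : Int → (Int × Int × Int) → Int),
      (∀ (c : Int), ∀ e ∈ S, f c e = if pvShift e 1 ∈ S then c else c + 1) →
      ∀ (l : List (Int × Int × Int)) (c : Int), (∀ x ∈ l, x ∈ S) →
      l.foldl f c = c + (l.countP (fun s => decide (pvShift s 1 ∉ S)) : Int) := by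
    intro f hf l
    induction l with
    | nil => intro c _; simp
    | cons y l ih =>
      intro c hsub
      have hy : y ∈ S := hsub y List.mem_cons_self
      simp only [List.foldl_cons]
      rw [hf c y hy, ih _ (fun x hx => hsub x (List.mem_cons_of_mem _ hx))]
      rw [List.countP_cons]
      by_cases hmem : pvShift y 1 ∈ S
      · simp [hmem]
      · simp only [hmem, if_neg, not_false_iff, decide_true]
        push_cast
        ring
  unfold walk_the_edge_alt
  refine (aux _ ?_ S 0 (fun x hx => hx)).trans (zero_add _)
  intro c e he
  rw [pvPred_spec e.2.2 (hdirs e he).1 (hdirs e he).2]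
  simp only [pvShift, one_mul]

-- ===== VERDICT (by name: the statement is the Claim_ definition above) =====
theorem walk_the_edge_spec : Claim_equal_walk_the_edge := by
  intro S _hdom hpre
  unfold Spec_walk_the_edge
  obtain ⟨hnd, hdirs⟩ := hpre
  have h0 := pvOuter_spec S hnd hdirs S [] [] 0 (by simp) (by simp) (by simp)
  have halt := pvAlt_eq S hdirs
  unfold walk_the_edge
  rw [h0, halt]
  have hc : S.countP (fun s => decide (pvShift s 1 ∉ S) &&
        !(decide (s ∈ ([] : List (Int × Int × Int)) ∨ s ∈ ([] : List (Int × Int × Int))))) =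
      S.countP (fun s => decide (pvShift s 1 ∉ S)) := by
    apply List.countP_congr
    intro x hx
    simp
  rw [hc]
  omega
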